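-- pv_equiv track=rewrite | github.com/zacn04/six-009 | lab.py | actors_with_bacon_number
-- ===== SOURCE A (Python) =====
-- def actors_with_bacon_number(transformed_data, n):
--     a = transformed_data
--     output = {4724}
--     ever = set()
--     for i in range(n):
--         dummy = output.copy()
--         for item in dummy:
--             output.remove(item)
--             try:
--                 output.update(a[item])
--             except:
--                 return set()
--             ever.update({item})
--         output.difference_update(ever)
--         output.discard(4724)
--     return output
-- ===== SOURCE B (Python) =====
-- from collections import deque
--
-- def actors_with_bacon_number(transformed_data, n):
--     if n <= 0:
--         return {4724}
--     a = transformed_data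
--     dist = {4724: 0}
--     queue = deque([4724])
--     while queue:
--         node = queue.popleft()
--         d = dist[node]
--         if d >= n:
--             break  # FIFO order: every remaining node is at distance n already
--         if node not in a:
--             return set()
--         for nb in a[node]:
--             if nb not in dist:
--                 dist[nb] = d + 1
--                 queue.append(nb)
--     return {v for v, d in dist.items() if d == n}
-- ===== Notes on version B (the rewrite author's own statement) =====
-- stated objective: idiomatic
-- what changed: Replaces the n-round frontier/seen two-set expansion (which copies, empties and rebuilds the frontier set every round and always runs all n rounds) by a single standard FIFO-queue BFS over a node-to-distance dict that stops as soon as the queue empties or distance n is reached, then returns the nodes whose recorded distance is n.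
import Mathlib
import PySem

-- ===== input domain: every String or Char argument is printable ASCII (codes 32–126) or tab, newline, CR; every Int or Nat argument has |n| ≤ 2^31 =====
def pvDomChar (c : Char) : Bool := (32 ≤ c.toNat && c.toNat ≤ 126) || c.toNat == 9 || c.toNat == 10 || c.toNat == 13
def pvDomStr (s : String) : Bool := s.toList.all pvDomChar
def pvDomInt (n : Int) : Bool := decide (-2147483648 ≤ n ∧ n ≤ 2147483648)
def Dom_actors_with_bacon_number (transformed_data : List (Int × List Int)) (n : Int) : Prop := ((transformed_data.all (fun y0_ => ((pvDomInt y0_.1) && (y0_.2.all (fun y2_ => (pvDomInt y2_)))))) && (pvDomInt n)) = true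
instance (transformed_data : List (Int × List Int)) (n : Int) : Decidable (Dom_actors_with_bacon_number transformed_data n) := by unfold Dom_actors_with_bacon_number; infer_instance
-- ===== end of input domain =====

-- ===== PORT A =====
-- A: n rounds of level-synchronised expansion over two Python sets ('output' frontier, 'ever' seen);
-- B: a single FIFO BFS over a distance dict that stops as soon as the queue empties or distance n is reached.
-- Equivalence of the RETURN value is proved; neither program mutates its arguments.

-- inner loop of A: 'for item in dummy: output.remove(item); try: output.update(a[item]) except: return set(); ever.update({item})'
-- ('output.remove(item)' never raises: item comes from the copy of output and is removed exactly once, so Set.discard is exact)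
def awbnInner (a : List (Int × List Int)) : List Int → PySem.Set Int → PySem.Set Int → Option (PySem.Set Int × PySem.Set Int)
  | [], output, ever => some (output, ever)
  | item :: rest, output, ever =>
    let output' := PySem.Set.discard output item
    match PySem.Dict.get? (PySem.Dict.mk a) item with
    | none => none
    | some nbs => awbnInner a rest (PySem.Set.update output' nbs) (PySem.Set.update ever [item])

-- outer loop of A: 'for i in range(n): dummy = output.copy(); …; output.difference_update(ever); output.discard(4724)'
-- (range(n) has n.toNat iterations)
def awbnRounds (a : List (Int × List Int)) : Nat → PySem.Set Int → PySem.Set Int → Option (PySem.Set Int)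
  | 0, output, _ => some output
  | k + 1, output, ever =>
    match awbnInner a output output ever with
    | none => none
    | some (output', ever') =>
      awbnRounds a k (PySem.Set.discard (PySem.Set.diff output' ever') 4724) ever'

def actors_with_bacon_number (transformed_data : List (Int × List Int)) (n : Int) : List Int :=
  match awbnRounds transformed_data n.toNat (PySem.Set.ofList [4724]) PySem.Set.empty with
  | none => []      -- 'return set()'
  | some s => s

-- ===== PORT B =====
-- 'for nb in a[node]: if nb not in dist: dist[nb] = d + 1; queue.append(nb)'  (st = (dist, appended nodes))
def awbnVisit (d : Int) (nbs : List Int) (st : PySem.Dict Int Int × List Int) : PySem.Dict Int Int × List Int :=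
  nbs.foldl (fun st nb => if st.1.contains nb then st else (st.1.insert nb (d + 1), st.2 ++ [nb])) st

-- 'while queue: node = queue.popleft(); …'.  The fuel only makes the recursion structural: the initial fuel
-- (number of listed neighbours + 1) bounds the total number of enqueues, so the fuel-0 branch is never reached.
def awbnGo (a : List (Int × List Int)) (n : Int) : Nat → PySem.Dict Int Int → List Int → Option (PySem.Dict Int Int)
  | 0, dist, _ => some dist
  | _ + 1, dist, [] => some dist
  | fuel + 1, dist, node :: queue =>
    let d := dist.getD node 0          -- dist[node]: every enqueued node has an entry
    if n ≤ d then some dist            -- 'break' (FIFO order: all remaining nodes are at distance ≥ n)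
    else
      match PySem.Dict.get? (PySem.Dict.mk a) node with
      | none => none                   -- 'return set()'
      | some nbs =>
        let st := awbnVisit d nbs (dist, [])
        awbnGo a n fuel st.1 (queue ++ st.2)

def actors_with_bacon_number_alt (transformed_data : List (Int × List Int)) (n : Int) : List Int :=
  if n ≤ 0 then [4724]
  else
    match awbnGo transformed_data n ((transformed_data.flatMap (fun p => p.2)).length + 1)
        (PySem.Dict.insert PySem.Dict.empty 4724 0) [4724] with
    | none => []
    | some dist => (dist.items.filter (fun p => p.2 == n)).map Prod.fst

-- ===== PRECONDITION & SPEC =====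
def Spec_actors_with_bacon_number (transformed_data : List (Int × List Int)) (n : Int) (out : List Int) : Prop := out = actors_with_bacon_number_alt transformed_data n
instance (transformed_data : List (Int × List Int)) (n : Int) (out : List Int) : Decidable (Spec_actors_with_bacon_number transformed_data n out) := by unfold Spec_actors_with_bacon_number; infer_instance

-- ===== CLAIM (what is proved, stated in full; the proofs are below) =====
def Claim_equal_actors_with_bacon_number : Prop := ∀ (transformed_data : List (Int × List Int)) (n : Int), Dom_actors_with_bacon_number transformed_data n → Spec_actors_with_bacon_number transformed_data n (actors_with_bacon_number transformed_data n)

-- ===== LEMMAS AND PROOFS =====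

-- 'x ∉ Bk' filter used to relate A's frontier bookkeeping with B's queue
def bfilter (Bk acc : List Int) : List Int := acc.filter (fun y => !Bk.contains y)

-- number of listed neighbours that have no dist entry yet (the quantity the fuel pays for)
def awbnMissing (a : List (Int × List Int)) (dist : PySem.Dict Int Int) : Nat :=
  ((PySem.Set.ofList (a.flatMap (fun p => p.2))).filter (fun x => !dist.contains x)).length

lemma get?_mk_mem {a : List (Int × List Int)} {k : Int} {v : List Int}
    (h : PySem.Dict.get? (PySem.Dict.mk a) k = some v) : (k, v) ∈ a := by
  simp only [PySem.Dict.get?, Option.map_eq_some_iff] at h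
  obtain ⟨p, hp, h2⟩ := h
  have h1 := List.find?_some hp
  have hm := List.mem_of_find?_eq_some hp
  simp only [beq_iff_eq] at h1
  subst h1 h2
  simpa using hm

lemma discard_cons_of_not_mem {x : Int} {l : List Int} (h : x ∉ l) :
    PySem.Set.discard (x :: l) x = l := by
  simp only [PySem.Set.discard, List.filter_cons, beq_self_eq_true, Bool.not_true,
    Bool.false_eq_true, if_false]
  exact List.filter_eq_self.mpr fun y hy => by
    simp only [Bool.not_eq_eq_eq_not, Bool.not_true, beq_eq_false_iff_ne, ne_eq]
    rintro rfl; exact h hy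

lemma missing_insert {a : List (Int × List Int)} {dist : PySem.Dict Int Int} {nb : Int} (v : Int)
    (hU : nb ∈ a.flatMap (fun p => p.2)) (hc : dist.contains nb = false) :
    awbnMissing a (dist.insert nb v) + 1 = awbnMissing a dist := by
  unfold awbnMissing
  have hpred : (PySem.Set.ofList (a.flatMap (fun p => p.2))).filter
      (fun x => !(dist.insert nb v).contains x)
      = ((PySem.Set.ofList (a.flatMap (fun p => p.2))).filter
          (fun x => !dist.contains x)).filter (fun y => !(y == nb)) := by
    rw [List.filter_filter]
    refine List.filter_congr fun x _ => ?_
    rw [PySem.Dict.contains_insert]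
    cases hxe : (x == nb)
    · simp
    · simp only [beq_iff_eq] at hxe; subst hxe; simp [hc]

  rw [hpred]
  have hnd : ((PySem.Set.ofList (a.flatMap (fun p => p.2))).filter
      (fun x => !dist.contains x)).Nodup := (PySem.Set.nodup_ofList _).filter _
  have hmem : nb ∈ (PySem.Set.ofList (a.flatMap (fun p => p.2))).filter
      (fun x => !dist.contains x) := by
    rw [List.mem_filter]
    exact ⟨(PySem.Set.mem_ofList _ _).mpr hU, by simp [hc]⟩
  have h1 : (((PySem.Set.ofList (a.flatMap (fun p => p.2))).filter
      (fun x => !dist.contains x)).filter (fun y => !(y == nb)))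
      = ((PySem.Set.ofList (a.flatMap (fun p => p.2))).filter
          (fun x => !dist.contains x)).erase nb := by
    rw [List.Nodup.erase_eq_filter hnd]; rfl
  rw [h1, List.length_erase_of_mem hmem]
  have := List.length_pos_of_mem hmem
  omega

lemma awbnVisit_spec (a : List (Int × List Int)) (r : Int) (Bk : List Int) (Cv : List (Int × Int)) :
    ∀ (nbs : List Int) (dist : PySem.Dict Int Int) (qA new : List Int) (M : Nat),
    Cv.map Prod.fst = Bk →
    dist.keys.Nodup →
    dist.items = Cv ++ (qA ++ new).map (fun x => (x, r + 1)) →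
    (∀ x ∈ nbs, x ∈ a.flatMap (fun p => p.2)) →
    (qA ++ new).length + awbnMissing a dist ≤ M →
    (awbnVisit r nbs (dist, new)).2
        = new ++ (PySem.Set.ofList nbs).filter (fun x => !(Bk.contains x || (qA ++ new).contains x)) ∧
    (awbnVisit r nbs (dist, new)).1.items
        = Cv ++ (qA ++ (awbnVisit r nbs (dist, new)).2).map (fun x => (x, r + 1)) ∧
    (awbnVisit r nbs (dist, new)).1.keys.Nodup ∧
    (qA ++ (awbnVisit r nbs (dist, new)).2).length + awbnMissing a (awbnVisit r nbs (dist, new)).1 ≤ M := by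
  intro nbs
  induction nbs with
  | nil =>
    intro dist qA new M hBkC hnd hitems hsub hM
    exact ⟨by simp [awbnVisit, PySem.Set.ofList_nil], by simpa [awbnVisit] using hitems,
      by simpa [awbnVisit] using hnd, by simpa [awbnVisit] using hM⟩
  | cons nb rest ih =>
    intro dist qA new M hBkC hnd hitems hsub hM
    have hkeys : ∀ x : Int, dist.contains x = true ↔ (x ∈ Bk ∨ x ∈ qA ++ new) := by
      intro x
      rw [PySem.Dict.contains_iff_mem_keys, PySem.Dict.keys, hitems]
      simp [← hBkC, List.mem_map]
    have hstep : awbnVisit r (nb :: rest) (dist, new)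
        = awbnVisit r rest (if dist.contains nb then (dist, new)
            else (dist.insert nb (r + 1), new ++ [nb])) := by
      simp only [awbnVisit, List.foldl_cons]
    rw [PySem.Set.ofList_cons]
    cases hc : dist.contains nb
    · -- nb is fresh: it is inserted and enqueued
      have hnbk : nb ∉ Bk ∧ nb ∉ qA ++ new := by
        constructor <;> intro hmem
        · exact absurd ((hkeys nb).mpr (Or.inl hmem)) (by simp [hc])
        · exact absurd ((hkeys nb).mpr (Or.inr hmem)) (by simp [hc])
      have hprednb : (!(Bk.contains nb || (qA ++ new).contains nb)) = true := by
        simp only [Bool.not_eq_eq_eq_not, Bool.not_true, Bool.or_eq_false_iff]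
        exact ⟨by simpa using hnbk.1, by simpa using hnbk.2⟩
      rw [hstep, if_neg (by simp [hc])]
      have hU : nb ∈ a.flatMap (fun p => p.2) := hsub nb (by simp)
      have hmiss := missing_insert (r + 1) hU hc
      obtain ⟨i1, i2, i3, i4⟩ := ih (dist.insert nb (r + 1)) qA (new ++ [nb]) M hBkC
        (PySem.Dict.nodup_keys_insert _ _ _ hnd)
        (by rw [PySem.Dict.items_insert_of_not_contains _ _ hc, hitems]
            simp [List.append_assoc])
        (fun x hx => hsub x (by simp [hx]))
        (by simp only [List.length_append, List.length_cons,
              List.length_nil] at hM ⊢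
            omega)
      refine ⟨?_, by simpa [List.append_assoc] using i2, i3,
        by simpa [List.append_assoc] using i4⟩
      rw [i1]
      have hff : (PySem.Set.discard (PySem.Set.ofList rest) nb).filter
            (fun x => !(Bk.contains x || (qA ++ new).contains x))
          = (PySem.Set.ofList rest).filter
            (fun x => !(Bk.contains x || (qA ++ (new ++ [nb])).contains x)) := by
        rw [PySem.Set.discard, List.filter_filter]
        refine List.filter_congr fun x _ => ?_
        cases hxe : (x == nb)
        · have hxne : x ≠ nb := by simpa using hxe
          simp [List.contains_eq_mem, hxne]
        · have hxeq : x = nb := by simpa using hxe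
          subst hxeq
          simp [List.contains_eq_mem]
      rw [← hff, List.filter_cons, if_pos hprednb]
      simp [List.append_assoc]
    · -- nb is already known: nothing happens
      have hnbmem : nb ∈ Bk ∨ nb ∈ qA ++ new := (hkeys nb).mp hc
      have hprednb : (!(Bk.contains nb || (qA ++ new).contains nb)) = false := by
        rcases hnbmem with hm | hm <;> simp [List.contains_eq_mem, hm]
      rw [hstep, if_pos hc]
      obtain ⟨i1, i2, i3, i4⟩ := ih dist qA new M hBkC hnd hitems
        (fun x hx => hsub x (by simp [hx])) hM
      refine ⟨?_, i2, i3, i4⟩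
      rw [i1]
      have hff : (PySem.Set.discard (PySem.Set.ofList rest) nb).filter
            (fun x => !(Bk.contains x || (qA ++ new).contains x))
          = (PySem.Set.ofList rest).filter
            (fun x => !(Bk.contains x || (qA ++ new).contains x)) := by
        rw [PySem.Set.discard, List.filter_filter]
        refine List.filter_congr fun x _ => ?_
        cases hxe : (x == nb)
        · simp
        · have hxeq : x = nb := by simpa using hxe
          subst hxeq
          simp only [hprednb, Bool.false_and]
      rw [List.filter_cons, if_neg (by rw [hprednb]; simp), hff]

lemma awbnLevel (a : List (Int × List Int)) (n r : Int) (Bk : List Int) (hrn : r < n) :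
    ∀ (S acc ev : List Int) (C : List (Int × Int)) (dist : PySem.Dict Int Int) (fuel : Nat),
    (S ++ acc).Nodup →
    (∀ x ∈ S, x ∈ Bk) →
    (∀ x ∈ S, x ∉ ev) →
    (∀ x ∈ S, (x, r) ∈ C) →
    C.map Prod.fst = Bk →
    dist.keys.Nodup →
    dist.items = C ++ (bfilter Bk acc).map (fun x => (x, r + 1)) →
    S.length + (bfilter Bk acc).length + awbnMissing a dist ≤ fuel →
    (match awbnInner a S (S ++ acc) ev with
     | none => awbnGo a n fuel dist (S ++ bfilter Bk acc) = none
     | some (out', ev') =>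
        ev' = ev ++ S ∧ out'.Nodup ∧
        ∃ dist' : PySem.Dict Int Int,
          awbnGo a n fuel dist (S ++ bfilter Bk acc)
            = awbnGo a n (fuel - S.length) dist' (bfilter Bk out') ∧
          dist'.keys.Nodup ∧
          dist'.items = C ++ (bfilter Bk out').map (fun x => (x, r + 1)) ∧
          (bfilter Bk out').length + awbnMissing a dist' ≤ fuel - S.length) := by
  intro S
  induction S with
  | nil =>
    intro acc ev C dist fuel hnd hSBk hSev hSval hBkC hknd hitems hfuel
    simp only [awbnInner, List.nil_append]
    exact ⟨by simp, by simpa using hnd, dist, by simp, hknd, hitems, by simpa using hfuel⟩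
  | cons item S' ih =>
    intro acc ev C dist fuel hnd hSBk hSev hSval hBkC hknd hitems hfuel
    have hnd' : item ∉ S' ++ acc ∧ (S' ++ acc).Nodup := by
      rw [List.cons_append, List.nodup_cons] at hnd; exact hnd
    have hdisc : PySem.Set.discard ((item :: S') ++ acc) item = S' ++ acc := by
      rw [List.cons_append]; exact discard_cons_of_not_mem hnd'.1
    have hd : dist.getD item 0 = r :=
      PySem.Dict.getD_of_mem_items dist
        (by rw [hitems]; exact List.mem_append_left _ (hSval item (List.mem_cons_self)))
        hknd 0
    have hfuel1 : 1 ≤ fuel := by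
      simp only [List.length_cons] at hfuel; omega
    obtain ⟨f, rfl⟩ : ∃ f, fuel = f + 1 := ⟨fuel - 1, by omega⟩
    cases hget : PySem.Dict.get? (PySem.Dict.mk a) item with
    | none =>
      have hInner : awbnInner a (item :: S') ((item :: S') ++ acc) ev = none := by
        simp only [awbnInner, hget]
      rw [hInner]
      show awbnGo a n (f + 1) dist ((item :: S') ++ bfilter Bk acc) = none
      rw [List.cons_append]
      simp only [awbnGo, hget]
      rw [hd, if_neg (by omega : ¬ n ≤ r)]
    | some nbs =>
      -- A's update of output, in closed form
      set accNew := (PySem.Set.ofList nbs).filter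
        (fun y => !(PySem.Set.contains (S' ++ acc) y)) with haccNew
      have hupd : PySem.Set.update (S' ++ acc) nbs = S' ++ (acc ++ accNew) := by
        rw [PySem.Set.update_eq_append_filter, List.append_assoc]
      have hevupd : PySem.Set.update ev [item] = ev ++ [item] := by
        simp only [PySem.Set.update, List.foldl_cons, List.foldl_nil]
        exact PySem.Set.add_of_not_mem (hSev item List.mem_cons_self)
      have hInner : awbnInner a (item :: S') ((item :: S') ++ acc) ev
          = awbnInner a S' (S' ++ (acc ++ accNew)) (ev ++ [item]) := by
        simp only [awbnInner, hdisc, hget, hupd, hevupd]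
      have hnbsU : ∀ x ∈ nbs, x ∈ a.flatMap (fun p => p.2) :=
        fun x hx => List.mem_flatMap.mpr ⟨(item, nbs), get?_mk_mem hget, hx⟩
      -- B's processing of the popped node, via awbnVisit_spec
      obtain ⟨v1, v2, v3, v4⟩ := awbnVisit_spec a r Bk C nbs dist (bfilter Bk acc) [] (f - S'.length)
        hBkC hknd (by simpa using hitems) hnbsU
        (by simp only [List.append_nil, List.length_cons] at hfuel ⊢; omega)
      set st := awbnVisit r nbs (dist, []) with hst
      have hadds : st.2 = bfilter Bk accNew := by
        rw [v1, haccNew]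
        simp only [List.nil_append, List.append_nil, bfilter, List.filter_filter]
        refine List.filter_congr fun x _ => ?_
        by_cases hx1 : x ∈ Bk
        · simp [List.contains_eq_mem, hx1]
        · by_cases hx2 : x ∈ S' ++ acc
          · rcases List.mem_append.mp hx2 with hxs | hxa
            · exact absurd (hSBk x (List.mem_cons_of_mem _ hxs)) hx1
            · simp [List.contains_eq_mem, List.mem_filter, hx1, hxa,
                List.mem_append.mpr (Or.inr hxa)]
          · have hxs : x ∉ S' := fun h => hx2 (List.mem_append.mpr (Or.inl h))
            have hxa : x ∉ acc := fun h => hx2 (List.mem_append.mpr (Or.inr h))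
            simp [List.contains_eq_mem, List.mem_filter, hx1, hx2, hxa]
      have hbf : bfilter Bk (acc ++ accNew) = bfilter Bk acc ++ st.2 := by
        rw [hadds, bfilter, List.filter_append]; rfl
      -- Nodup of the extended A-state
      have hndnew : (S' ++ (acc ++ accNew)).Nodup := by
        rw [← List.append_assoc]
        refine List.Nodup.append hnd'.2 ((PySem.Set.nodup_ofList _).filter _) ?_
        exact List.disjoint_left.mpr fun y hy hy2 => by
          have := (List.mem_filter.mp hy2).2
          simp [List.contains_eq_mem, hy] at this
      -- the inductive step for the rest of the frontier
      have ihx := ih (acc ++ accNew) (ev ++ [item]) C st.1 f hndnew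
        (fun x hx => hSBk x (List.mem_cons_of_mem _ hx))
        (fun x hx => by
          simp only [List.mem_append, List.mem_singleton, not_or]
          exact ⟨hSev x (List.mem_cons_of_mem _ hx),
            fun he => hnd'.1 (he ▸ List.mem_append.mpr (Or.inl hx))⟩)
        (fun x hx => hSval x (List.mem_cons_of_mem _ hx))
        hBkC v3
        (by rw [hbf]; exact v2)
        (by rw [hbf]
            simp only [List.length_append, List.length_cons] at hfuel v4 ⊢
            omega)
      -- unfold one step of awbnGo
      have hgo : awbnGo a n (f + 1) dist ((item :: S') ++ bfilter Bk acc)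
          = awbnGo a n f st.1 (S' ++ bfilter Bk (acc ++ accNew)) := by
        rw [List.cons_append]
        simp only [awbnGo, hget]
        rw [hd, if_neg (by omega : ¬ n ≤ r), hbf, ← List.append_assoc]
      rw [hInner, hgo]
      cases hcase : awbnInner a S' (S' ++ (acc ++ accNew)) (ev ++ [item]) with
      | none => rw [hcase] at ihx; exact ihx
      | some p =>
        obtain ⟨out', ev'⟩ := p
        rw [hcase] at ihx
        obtain ⟨e1, e2, dist', g1, g2, g3, g4⟩ := ihx
        refine ⟨by rw [e1, List.append_assoc]; rfl, e2, dist', ?_, g2, g3, ?_⟩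
        · rw [g1]
          congr 1
          simp only [List.length_cons]
          omega
        · simp only [List.length_cons] at g4 ⊢
          omega

lemma awbnMain (a : List (Int × List Int)) (n : Int) :
    ∀ (k : Nat) (out ev : List Int) (C : List (Int × Int)) (dist : PySem.Dict Int Int) (fuel : Nat),
    out.Nodup →
    (∀ x ∈ out, x ∉ ev) →
    ((4724 : Int) ∈ ev ∨ (4724 : Int) ∈ out) →
    C.map Prod.fst = ev →
    (∀ p ∈ C, p.2 < n - k) →
    dist.keys.Nodup →
    dist.items = C ++ out.map (fun x => (x, n - k)) →
    out.length + awbnMissing a dist ≤ fuel →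
    (match awbnRounds a k out ev with
     | none => awbnGo a n fuel dist out = none
     | some s => ∃ dist' : PySem.Dict Int Int, awbnGo a n fuel dist out = some dist' ∧
          (dist'.items.filter (fun p => p.2 == n)).map Prod.fst = s) := by
  intro k
  induction k with
  | zero =>
    intro out ev C dist fuel hnod hoev h47 hCfst hCval hknd hitems hfuel
    simp only [awbnRounds]
    have hn0 : ((n : Int) - ((0 : Nat) : Int)) = n := by push_cast; ring
    rw [hn0] at hitems hCval
    have hgo : awbnGo a n fuel dist out = some dist := by
      cases out with
      | nil => cases fuel <;> simp [awbnGo]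
      | cons x rest =>
        obtain ⟨f, rfl⟩ : ∃ f, fuel = f + 1 :=
          ⟨fuel - 1, by simp only [List.length_cons] at hfuel; omega⟩
        have hd : dist.getD x 0 = n :=
          PySem.Dict.getD_of_mem_items dist
            (by rw [hitems]
                exact List.mem_append_right _ (List.mem_map.mpr ⟨x, List.mem_cons_self, rfl⟩))
            hknd 0
        simp only [awbnGo]
        rw [hd, if_pos le_rfl]
    refine ⟨dist, hgo, ?_⟩
    rw [hitems, List.filter_append]
    have h1 : C.filter (fun p => p.2 == n) = [] :=
      List.filter_eq_nil_iff.mpr fun p hp => by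
        have := hCval p hp; simp only [beq_iff_eq]; omega
    have h2 : (out.map (fun x => (x, n))).filter (fun p => p.2 == n)
        = out.map (fun x => (x, n)) :=
      List.filter_eq_self.mpr fun p hp => by
        obtain ⟨x, _, rfl⟩ := List.mem_map.mp hp; simp
    rw [h1, h2]
    simp [List.map_map, Function.comp_def]
  | succ k ihk =>
    intro out ev C dist fuel hnod hoev h47 hCfst hCval hknd hitems hfuel
    have hr : ((n : Int) - ((k + 1 : Nat) : Int)) < n := by push_cast; omega
    have h47mem : (4724 : Int) ∈ ev ++ out := List.mem_append.mpr h47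
    have hlev := awbnLevel a n (n - ((k + 1 : Nat) : Int)) (ev ++ out) hr out [] ev
      (C ++ out.map (fun x => (x, n - ((k + 1 : Nat) : Int)))) dist fuel
      (by simpa using hnod)
      (fun x hx => List.mem_append.mpr (Or.inr hx))
      hoev
      (fun x hx => List.mem_append_right _ (List.mem_map.mpr ⟨x, hx, rfl⟩))
      (by simp [hCfst, List.map_map, Function.comp_def])
      hknd
      (by rw [hitems]; simp [bfilter])
      (by simpa [bfilter] using hfuel)
    simp only [List.append_nil, bfilter, List.filter_nil] at hlev
    have hvadd : (n - ((k + 1 : Nat) : Int)) + 1 = n - ((k : Nat) : Int) := by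
      push_cast; ring
    cases hcase : awbnInner a out out ev with
    | none =>
      rw [hcase] at hlev
      have hRk : awbnRounds a (k + 1) out ev = none := by
        simp only [awbnRounds, hcase]
      rw [hRk]
      exact hlev
    | some p =>
      obtain ⟨out', ev'⟩ := p
      rw [hcase] at hlev
      obtain ⟨e1, e2, dist', g1, g2, g3, g4⟩ := hlev
      have hdiff : PySem.Set.discard (PySem.Set.diff out' ev') 4724
          = List.filter (fun y => !(ev ++ out).contains y) out' := by
        rw [e1, PySem.Set.diff, PySem.Set.discard]
        exact List.filter_eq_self.mpr fun y hy => by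
          have h2 : y ∉ ev ++ out := by
            have := (List.mem_filter.mp hy).2
            simpa [List.contains_eq_mem] using this
          simp only [Bool.not_eq_eq_eq_not, Bool.not_true, beq_eq_false_iff_ne, ne_eq]
          rintro rfl; exact h2 h47mem
      have ihx := ihk (List.filter (fun y => !(ev ++ out).contains y) out') ev'
        (C ++ out.map (fun x => (x, n - ((k + 1 : Nat) : Int)))) dist' (fuel - out.length)
        (e2.filter _)
        (fun x hx => by
          have h2 := (List.mem_filter.mp hx).2
          rw [e1]
          simpa using h2)
        (Or.inl (e1 ▸ h47mem))
        (by rw [e1]; simp [hCfst, List.map_map, Function.comp_def])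
        (fun p hp => by
          rcases List.mem_append.mp hp with hp1 | hp2
          · have := hCval p hp1; push_cast at this ⊢; omega
          · obtain ⟨x, _, rfl⟩ := List.mem_map.mp hp2; push_cast; omega)
        g2
        (by rw [g3, hvadd])
        (by exact g4)
      have hRk : awbnRounds a (k + 1) out ev
          = awbnRounds a k (PySem.Set.discard (PySem.Set.diff out' ev') 4724) ev' := by
        simp only [awbnRounds, hcase]
      rw [hRk, hdiff]
      cases hrec : awbnRounds a k (List.filter (fun y => !(ev ++ out).contains y) out') ev' with
      | none =>
        rw [hrec] at ihx
        rw [g1]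
        exact ihx
      | some s =>
        rw [hrec] at ihx
        obtain ⟨dist'', hh1, hh2⟩ := ihx
        exact ⟨dist'', by rw [g1]; exact hh1, hh2⟩

-- ===== VERDICT (by name: the statement is the Claim_ definition above) =====
theorem actors_with_bacon_number_spec : Claim_equal_actors_with_bacon_number := by
  unfold Claim_equal_actors_with_bacon_number
  intro a n _
  unfold Spec_actors_with_bacon_number actors_with_bacon_number actors_with_bacon_number_alt
  have e1 : PySem.Set.ofList [(4724 : Int)] = [4724] := rfl
  have e2 : (PySem.Set.empty : PySem.Set Int) = [] := rfl
  rw [e1, e2]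
  by_cases hn : n ≤ 0
  · rw [if_pos hn, Int.toNat_of_nonpos hn]
    simp [awbnRounds]
  · rw [if_neg hn]
    have h0 : ((n.toNat : Int)) = n := Int.toNat_of_nonneg (by omega)
    have hmiss : awbnMissing a (PySem.Dict.insert PySem.Dict.empty 4724 0)
        ≤ (a.flatMap (fun p => p.2)).length := by
      calc awbnMissing a (PySem.Dict.insert PySem.Dict.empty 4724 0)
          ≤ (PySem.Set.ofList (a.flatMap (fun p => p.2))).length :=
            List.length_filter_le _ _
        _ ≤ (a.flatMap (fun p => p.2)).length := PySem.Set.length_ofList_le _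
    have hstart := awbnMain a n n.toNat [4724] [] []
      (PySem.Dict.insert PySem.Dict.empty 4724 0) ((a.flatMap (fun p => p.2)).length + 1)
      (by simp) (by simp) (Or.inr (by simp)) (by simp)
      (by simp)
      (PySem.Dict.nodup_keys_insert _ _ _ PySem.Dict.nodup_keys_empty)
      (by rw [show ((n.toNat : Int)) = n from h0, sub_self]; rfl)
      (by simp only [List.length_cons, List.length_nil]; omega)
    cases hres : awbnRounds a n.toNat [4724] [] with
    | none =>
      rw [hres] at hstart
      rw [hstart]
    | some s =>
      rw [hres] at hstart
      obtain ⟨dist', hgo, hfil⟩ := hstart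
      rw [hgo]
      exact hfil.symm
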